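-- pv_equiv track=rewrite | github.com/Guoming-Gao/smfish-like-rt-probe-designer | utils/filters.py | is_it_ok_4_c_spec_stack
-- ===== SOURCE A (Python) =====
-- def is_it_ok_4_c_spec_stack(seq):
--     """PNAS Rule 5: No 6-nt windows with >50% cytosine"""
--     seq = seq.upper()
--     for i in range(len(seq) - 5):
--         window = seq[i : i + 6]
--         c_percent = window.count("C") / 6
--         if c_percent > 0.5:
--             return False
--     return True
-- ===== SOURCE B (Python) =====
-- def is_it_ok_4_c_spec_stack(seq):
--     """PNAS Rule 5 via a prefix-count table: pre[i] = number of 'C' in seq[:i];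
--     a 6-nt window starting at i has >50% cytosine iff pre[i+6]-pre[i] > 3."""
--     s = seq.upper()
--     pre = [0]
--     c = 0
--     for ch in s:
--         c += 1 if ch == "C" else 0
--         pre.append(c)
--     for i in range(len(s) - 5):
--         if pre[i + 6] - pre[i] > 3:
--             return False
--     return True
-- ===== Notes on version B (the rewrite author's own statement) =====
-- stated objective: faster
-- what changed: Replaces per-window slicing and substring recounting of cytosines with a prefix-count table built in one pass, each 6-nt window tested by a single subtraction of two table entries against the threshold 3.
import Mathlib
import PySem

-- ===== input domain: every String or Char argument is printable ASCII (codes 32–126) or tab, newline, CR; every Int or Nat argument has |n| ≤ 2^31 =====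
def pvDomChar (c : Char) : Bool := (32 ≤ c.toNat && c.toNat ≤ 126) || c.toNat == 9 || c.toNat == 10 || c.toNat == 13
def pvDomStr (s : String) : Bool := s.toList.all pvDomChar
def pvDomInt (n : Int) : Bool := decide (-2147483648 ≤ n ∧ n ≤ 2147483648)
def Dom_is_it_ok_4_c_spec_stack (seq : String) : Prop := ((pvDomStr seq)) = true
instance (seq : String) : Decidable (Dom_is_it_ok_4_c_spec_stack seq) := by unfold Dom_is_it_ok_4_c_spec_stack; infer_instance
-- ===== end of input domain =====

-- B replaces per-window recounting with a one-pass prefix-count table (objective: faster).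

-- ===== PORT A =====
-- the for-loop over range(len(seq)-5) with early `return False`
def pvLoopA (t : String) : List Int → Bool
  | [] => true
  | i :: rest =>
      let window := PySem.Str.slice t (some i) (some (i + 6))
      -- `window.count("C") / 6 > 0.5` is exact in float arithmetic iff count > 3 (count ∈ 0..6, 3/6 = 0.5 exactly)
      if 3 < PySem.Str.count window "C" then false
      else pvLoopA t rest

def is_it_ok_4_c_spec_stack (seq : String) : Bool :=
  let t := PySem.Str.upper seq
  pvLoopA t (PySem.List.pyRange 0 (PySem.Str.len t - 5) 1)

-- ===== PORT B =====
-- first loop of Source B: builds pre = [0, …] appending the running 'C'-count after each character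
def pvPrefixB : List Char → List Int → Int → List Int
  | [], pre, _ => pre
  | ch :: rest, pre, c =>
      let c' := c + (if ch == 'C' then 1 else 0)
      pvPrefixB rest (pre ++ [c']) c'

-- second loop of Source B with early `return False`; pre[i] / pre[i+6] are always in range (pyGetD default never read)
def pvLoopB (pre : List Int) : List Int → Bool
  | [] => true
  | i :: rest =>
      if 3 < PySem.List.pyGetD pre (i + 6) 0 - PySem.List.pyGetD pre i 0 then false
      else pvLoopB pre rest

def is_it_ok_4_c_spec_stack_alt (seq : String) : Bool :=
  let s := PySem.Str.upper seq
  let pre := pvPrefixB s.toList [0] 0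
  pvLoopB pre (PySem.List.pyRange 0 (PySem.Str.len s - 5) 1)

-- ===== PRECONDITION & SPEC =====
def Spec_is_it_ok_4_c_spec_stack (seq : String) (out : Bool) : Prop := out = is_it_ok_4_c_spec_stack_alt seq
instance (seq : String) (out : Bool) : Decidable (Spec_is_it_ok_4_c_spec_stack seq out) := by unfold Spec_is_it_ok_4_c_spec_stack; infer_instance

-- ===== CLAIM (what is proved, stated in full; the proofs are below) =====
def Claim_equal_is_it_ok_4_c_spec_stack : Prop := ∀ (seq : String), Dom_is_it_ok_4_c_spec_stack seq → Spec_is_it_ok_4_c_spec_stack seq (is_it_ok_4_c_spec_stack seq)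

-- ===== LEMMAS AND PROOFS =====

-- Chars.count with a single-character needle is List.count
theorem pv_countGo_single (c : Char) :
    ∀ (fuel : Nat) (l : List Char) (acc : Nat), l.length ≤ fuel →
      PySem.Chars.count.go [c] fuel l acc = acc + l.count c := by
  intro fuel
  induction fuel with
  | zero => intro l acc h; cases l <;> simp_all [PySem.Chars.count.go]
  | succ n ih =>
      intro l acc h
      cases l with
      | nil => simp [PySem.Chars.count.go]
      | cons hd tl =>
          have htl : tl.length ≤ n := by simpa using h
          simp only [PySem.Chars.count.go, List.isPrefixOf]
          split_ifs with hp
          · rw [show List.drop ([c].length) (hd :: tl) = tl from rfl]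
            rw [ih tl (acc + 1) htl]
            have hc : c = hd := by simpa using hp
            simp [← hc]
            omega
          · rw [ih tl acc htl]
            have hc : ¬ c = hd := by simpa using hp
            simp [List.count_cons]
            exact fun h => hc h.symm

theorem pv_count_single (l : List Char) (c : Char) :
    PySem.Chars.count l [c] = l.count c := by
  simp [PySem.Chars.count]
  simpa using pv_countGo_single c l.length l 0 (le_refl _)

-- the prefix loop produces exactly the list of prefix counts (shifted by the accumulator)
theorem pv_prefixB_spec (l : List Char) :
    ∀ (pre : List Int) (c : Int),
      pvPrefixB l pre c =
        pre ++ (List.range l.length).map (fun k => c + ((l.take (k + 1)).count 'C' : Int)) := by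
  induction l with
  | nil => intro pre c; simp [pvPrefixB]
  | cons hd tl ih =>
      intro pre c
      simp only [pvPrefixB]
      rw [ih, List.append_assoc]
      congr 1
      simp only [List.length_cons, List.range_succ_eq_map, List.map_cons, List.map_map,
        List.singleton_append]
      congr 1
      · simp only [List.take_succ_cons, List.take_zero, List.count_cons, List.count_nil]
        split_ifs with h <;> simp
      · apply List.map_congr_left
        intro k _
        simp only [Function.comp, List.take_succ_cons, List.count_cons]
        push_cast
        split_ifs with h <;> ring

-- closed form of the whole prefix table
theorem pv_pre_eq (cs : List Char) :
    pvPrefixB cs [0] 0 =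
      (List.range (cs.length + 1)).map (fun k => ((cs.take k).count 'C' : Int)) := by
  rw [pv_prefixB_spec]
  rw [List.range_succ_eq_map]
  simp [List.map_map, Function.comp]

-- indexing the prefix table
theorem pv_pre_get (cs : List Char) (k : Nat) (hk : k ≤ cs.length) :
    PySem.List.pyGetD (pvPrefixB cs [0] 0) (k : Int) 0 = ((cs.take k).count 'C' : Int) := by
  rw [pv_pre_eq, PySem.List.pyGetD_natCast]
  have hlen : k < ((List.range (cs.length + 1)).map
      (fun k => ((cs.take k).count 'C' : Int))).length := by
    simp; omega
  rw [List.getD_eq_getElem _ _ hlen]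
  simp

-- window condition equality at one in-range index
theorem pv_cond_eq (t : String) (i : Int) (h0 : 0 ≤ i) (h6 : i + 6 ≤ (t.toList.length : Int)) :
    (3 < PySem.Str.count (PySem.Str.slice t (some i) (some (i + 6))) "C") ↔
      (3 < PySem.List.pyGetD (pvPrefixB t.toList [0] 0) (i + 6) 0 -
           PySem.List.pyGetD (pvPrefixB t.toList [0] 0) i 0) := by
  obtain ⟨j, rfl⟩ : ∃ j : Nat, i = (j : Int) := ⟨i.toNat, (Int.toNat_of_nonneg h0).symm⟩
  have hj6 : j + 6 ≤ t.toList.length := by exact_mod_cast h6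
  have hj : j ≤ t.toList.length := by omega
  have hslice : (PySem.Str.slice t (some (j : Int)) (some ((j : Int) + 6))).toList =
      (t.toList.drop j).take 6 := by
    rw [PySem.Str.toList_slice, PySem.Chars.slice_eq_listSlice]
    have h6' : ((j : Int) + 6) = ((j : Int) + ((6 : Nat) : Int)) := by push_cast; ring
    rw [h6', PySem.List.slice_natCast_add]
  have hcount : PySem.Str.count (PySem.Str.slice t (some (j : Int)) (some ((j : Int) + 6))) "C" =
      ((t.toList.drop j).take 6).count 'C' := by
    rw [PySem.Str.count_eq, hslice]
    simpa using pv_count_single ((t.toList.drop j).take 6) 'C'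
  have hplus : ((j : Int) + 6) = (((j + 6 : Nat)) : Int) := by push_cast; ring
  rw [hcount, hplus, pv_pre_get _ _ hj6, pv_pre_get _ _ hj]
  have htake : t.toList.take (j + 6) = t.toList.take j ++ (t.toList.drop j).take 6 := by
    rw [List.take_add]
  rw [htake, List.count_append]
  constructor <;> intro hx
  · push_cast; omega
  · have : (3 : Int) < (((t.toList.drop j).take 6).count 'C' : Int) := by push_cast at hx ⊢; omega
    exact_mod_cast this

-- the two loops agree on any index list whose members are in range
theorem pv_loops_eq (t : String) (idxs : List Int)
    (hmem : ∀ i ∈ idxs, 0 ≤ i ∧ i + 6 ≤ (t.toList.length : Int)) :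
    pvLoopA t idxs = pvLoopB (pvPrefixB t.toList [0] 0) idxs := by
  induction idxs with
  | nil => rfl
  | cons i rest ih =>
      obtain ⟨h0, h6⟩ := hmem i (by simp)
      have hc := pv_cond_eq t i h0 h6
      simp only [pvLoopA, pvLoopB]
      by_cases h : 3 < PySem.Str.count (PySem.Str.slice t (some i) (some (i + 6))) "C"
      · rw [if_pos h, if_pos (hc.mp h)]
      · rw [if_neg h, if_neg (fun hb => h (hc.mpr hb))]
        exact ih (fun j hj => hmem j (by simp [hj]))

-- ===== VERDICT (by name: the statement is the Claim_ definition above) =====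
theorem is_it_ok_4_c_spec_stack_spec : Claim_equal_is_it_ok_4_c_spec_stack := by
  intro seq _
  unfold Spec_is_it_ok_4_c_spec_stack
  unfold is_it_ok_4_c_spec_stack is_it_ok_4_c_spec_stack_alt
  apply pv_loops_eq
  intro i hi
  rw [PySem.List.mem_pyRange_one] at hi
  have hlen : PySem.Str.len (PySem.Str.upper seq) = ((PySem.Str.upper seq).toList.length : Int) := by
    simp [PySem.Str.len_eq]
  constructor
  · exact hi.1
  · have h2 := hi.2
    rw [hlen] at h2
    omega
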